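-- pv_equiv track=rewrite | github.com/unifyai/unity | unity/actor/environments/rendering.py | parse_format_sections
-- ===== SOURCE A (Python) =====
-- def parse_format_sections(fmt: str) -> list[str]:
--     """Split Excel format string into sections (positive; negative; zero; text)."""
--     sections, current, depth = [], "", 0
--     for c in fmt:
--         if c == "[":
--             depth += 1
--         elif c == "]":
--             depth -= 1
--         if c == ";" and depth == 0:
--             sections.append(current)
--             current = ""
--         else:
--             current += c
--     sections.append(current)
--     return sections
-- ===== SOURCE B (Python) =====
-- def parse_format_sections(fmt: str) -> list[str]:
--     """Split Excel format string into sections (positive; negative; zero; text)."""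
--     depth = 0
--     splits = []
--     for i, c in enumerate(fmt):
--         if c == "[":
--             depth += 1
--         elif c == "]":
--             depth -= 1
--         elif c == ";" and depth == 0:
--             splits.append(i)
--     out = []
--     prev = 0
--     for i in splits:
--         out.append(fmt[prev:i])
--         prev = i + 1
--     out.append(fmt[prev:])
--     return out
-- ===== Notes on version B (the rewrite author's own statement) =====
-- stated objective: alternative
-- what changed: B replaces A's char-by-char accumulator (growing the current section one character at a time) with a two-pass scheme: one depth-tracking scan records the indices of top-level semicolons, then the sections are produced by slicing the string between consecutive separator indices.
import Mathlib
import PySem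

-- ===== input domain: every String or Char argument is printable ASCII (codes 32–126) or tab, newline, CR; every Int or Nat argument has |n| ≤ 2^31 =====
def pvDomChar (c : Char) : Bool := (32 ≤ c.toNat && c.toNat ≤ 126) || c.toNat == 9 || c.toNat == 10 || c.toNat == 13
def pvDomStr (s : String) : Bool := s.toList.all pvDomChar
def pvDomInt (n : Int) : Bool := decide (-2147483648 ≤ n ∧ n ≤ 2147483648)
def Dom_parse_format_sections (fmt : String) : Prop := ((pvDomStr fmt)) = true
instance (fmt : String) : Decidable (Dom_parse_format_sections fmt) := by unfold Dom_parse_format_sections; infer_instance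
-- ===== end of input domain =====

-- B splits the string by slicing at precomputed top-level-semicolon indices instead of
-- accumulating the current section character by character (alternative decomposition).

-- ===== PORT A =====
-- step of A's loop: state (sections, current, depth); strings handled as List Char (exact on ASCII and all chars)
def pvStepA (st : List (List Char) × List Char × Int) (c : Char) :
    List (List Char) × List Char × Int :=
  let sections := st.1
  let current := st.2.1
  let depth := st.2.2
  let depth := if c = '[' then depth + 1 else if c = ']' then depth - 1 else depth
  if c = ';' ∧ depth = 0 then (sections ++ [current], [], depth)
  else (sections, current ++ [c], depth)

def parse_format_sections (fmt : String) : List String :=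
  let st := fmt.toList.foldl pvStepA ([], [], 0)
  (st.1 ++ [st.2.1]).map String.ofList

-- ===== PORT B =====
-- pass 1: indices (into the full string) of ';' seen at bracket depth 0
def pvSplitIdx : List Char → Int → Nat → List Nat
  | [], _, _ => []
  | c :: cs, depth, i =>
    if c = '[' then pvSplitIdx cs (depth + 1) (i + 1)
    else if c = ']' then pvSplitIdx cs (depth - 1) (i + 1)
    else if c = ';' ∧ depth = 0 then i :: pvSplitIdx cs depth (i + 1)
    else pvSplitIdx cs depth (i + 1)

-- pass 2: out.append(fmt[prev:i]); prev = i+1; ...; out.append(fmt[prev:]).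
-- fmt[prev:i] with 0 ≤ prev ≤ i ≤ len is exactly (drop prev).take (i - prev).
def pvSliceLoop (full : List Char) : List Nat → Nat → List (List Char)
  | [], prev => [full.drop prev]
  | i :: is, prev => (full.drop prev).take (i - prev) :: pvSliceLoop full is (i + 1)

def parse_format_sections_alt (fmt : String) : List String :=
  (pvSliceLoop fmt.toList (pvSplitIdx fmt.toList 0 0) 0).map String.ofList

-- ===== PRECONDITION & SPEC =====
def Spec_parse_format_sections (fmt : String) (out : List String) : Prop := out = parse_format_sections_alt fmt
instance (fmt : String) (out : List String) : Decidable (Spec_parse_format_sections fmt out) := by unfold Spec_parse_format_sections; infer_instance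

-- ===== CLAIM (what is proved, stated in full; the proofs are below) =====
def Claim_equal_parse_format_sections : Prop := ∀ (fmt : String), Dom_parse_format_sections fmt → Spec_parse_format_sections fmt (parse_format_sections fmt)

-- ===== LEMMAS AND PROOFS =====

-- common characterisation: split a char list at top-level semicolons
def pvSplitTop : List Char → Int → List (List Char)
  | [], _ => [[]]
  | c :: cs, d =>
    let d' := if c = '[' then d + 1 else if c = ']' then d - 1 else d
    if c = ';' ∧ d' = 0 then [] :: pvSplitTop cs d'
    else (pvSplitTop cs d').modifyHead (fun t => c :: t)

theorem pvModifyHead_modifyHead {α : Type} (f g : α → α) (l : List α) :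
    (l.modifyHead g).modifyHead f = l.modifyHead (fun a => f (g a)) := by
  cases l <;> simp

theorem pvModifyHead_id {α : Type} (l : List α) :
    l.modifyHead (fun a => a) = l := by cases l <;> simp

theorem pvFoldA_eq (cs : List Char) : ∀ (s : List (List Char)) (cur : List Char) (d : Int),
    ((cs.foldl pvStepA (s, cur, d)).1 ++ [(cs.foldl pvStepA (s, cur, d)).2.1])
      = s ++ (pvSplitTop cs d).modifyHead (fun t => cur ++ t) := by
  induction cs with
  | nil => intro s cur d; simp [pvSplitTop]
  | cons c cs ih =>
    intro s cur d
    simp only [List.foldl, pvStepA, pvSplitTop]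
    by_cases hc : c = ';' ∧ (if c = '[' then d + 1 else if c = ']' then d - 1 else d) = 0
    · rw [if_pos hc, if_pos hc, ih]
      simp [pvModifyHead_id]
    · rw [if_neg hc, if_neg hc, ih, pvModifyHead_modifyHead]
      simp

theorem pvSplitIdx_ge (cs : List Char) : ∀ (d : Int) (n : Nat),
    ∀ i ∈ pvSplitIdx cs d n, n ≤ i := by
  induction cs with
  | nil => intro d n i h; simp [pvSplitIdx] at h
  | cons c cs ih =>
    intro d n i h
    simp only [pvSplitIdx] at h
    split at h
    · exact le_trans (Nat.le_succ n) (ih _ _ _ h)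
    · split at h
      · exact le_trans (Nat.le_succ n) (ih _ _ _ h)
      · split at h
        · rcases List.mem_cons.mp h with h | h
          · omega
          · exact le_trans (Nat.le_succ n) (ih _ _ _ h)
        · exact le_trans (Nat.le_succ n) (ih _ _ _ h)

theorem pvSliceLoop_shift (full : List Char) (idxs : List Nat) (n : Nat) (c : Char)
    (rest : List Char) (hdrop : full.drop n = c :: rest)
    (hge : ∀ i ∈ idxs, n + 1 ≤ i) :
    pvSliceLoop full idxs n = (pvSliceLoop full idxs (n + 1)).modifyHead (fun t => c :: t) := by
  have hdrop1 : full.drop (n + 1) = rest := by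
    rw [← List.tail_drop, hdrop]; rfl
  cases idxs with
  | nil => simp [pvSliceLoop, hdrop, hdrop1]
  | cons i is =>
    have hi : n + 1 ≤ i := hge i (List.mem_cons_self ..)
    simp only [pvSliceLoop, List.modifyHead]
    congr 1
    have he : i - n = (i - (n + 1)) + 1 := by omega
    rw [he, hdrop, hdrop1, List.take_succ_cons]

theorem pvSliceLoop_eq (cs : List Char) : ∀ (d : Int) (n : Nat) (full : List Char),
    full.drop n = cs →
    pvSliceLoop full (pvSplitIdx cs d n) n = pvSplitTop cs d := by
  induction cs with
  | nil => intro d n full h; simp [pvSplitIdx, pvSliceLoop, h, pvSplitTop]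
  | cons c cs ih =>
    intro d n full h
    have hdrop1 : full.drop (n + 1) = cs := by
      rw [← List.tail_drop, h]; rfl
    have hskip : ∀ d2 : Int,
        pvSliceLoop full (pvSplitIdx cs d2 (n + 1)) n
          = (pvSplitTop cs d2).modifyHead (fun t => c :: t) := by
      intro d2
      rw [pvSliceLoop_shift full _ n c cs h (pvSplitIdx_ge cs d2 (n + 1)),
          ih d2 (n + 1) full hdrop1]
    by_cases h1 : c = '['
    · have hns : ¬ (c = ';' ∧ (d + 1 : Int) = 0) := by simp [h1]
      simp only [pvSplitIdx, pvSplitTop, if_pos h1, if_neg hns]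
      exact hskip (d + 1)
    · by_cases h2 : c = ']'
      · have hns : ¬ (c = ';' ∧ (d - 1 : Int) = 0) := by simp [h2]
        simp only [pvSplitIdx, pvSplitTop, if_neg h1, if_pos h2, if_neg hns]
        exact hskip (d - 1)
      · simp only [pvSplitIdx, pvSplitTop, if_neg h1, if_neg h2]
        by_cases h3 : c = ';' ∧ d = 0
        · simp only [if_pos h3, pvSliceLoop, Nat.sub_self, List.take_zero]
          rw [ih d (n + 1) full hdrop1]
        · simp only [if_neg h3]
          exact hskip d

-- ===== VERDICT (by name: the statement is the Claim_ definition above) =====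
theorem parse_format_sections_spec : Claim_equal_parse_format_sections := by
  intro fmt _
  simp only [Spec_parse_format_sections, parse_format_sections, parse_format_sections_alt]
  rw [pvSliceLoop_eq fmt.toList 0 0 fmt.toList (by simp)]
  have hA := pvFoldA_eq fmt.toList [] [] 0
  simp only [List.nil_append] at hA
  rw [hA, pvModifyHead_id]
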